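-- pv_equiv track=rewrite | github.com/ahsanMah/mini-projects | leetcode/dp/max_profit.py | maxProfitPath
-- ===== SOURCE A (Python) =====
-- def maxProfitPath(grid) -> int:
--
--     rows = len(grid)
--     cols = len(grid[0])
--
--     # using memo to store parents
--     memo = []
--     for i in range(rows):
--         memo.append([0]*cols)
--
--     for i in range(rows):
--         for j in range(cols):
--
--             parent = (i,j)
--             profit = grid[i][j]
--
--             if i > 0 and j > 0:
--
--                 if grid[i][j-1] > grid[i-1][j]:
--                     parent = (i,j-1)
--                     profit += grid[i][j-1]
--                 else:
--                     parent = (i-1,j)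
--                     profit += grid[i-1][j]
--
--             elif i > 0: #j==0
--                 profit += grid[i-1][j]
--                 parent = (i-1, j)
--
--             elif j > 0: #i==0
--                 profit += grid[i][j-1]
--                 parent = (i, j-1)
--
--             grid[i][j] = profit
--             memo[i][j] = parent
--
--     # Build path starting from last position
--     parent = (rows-1, cols-1)
--     path = [parent]
--     while parent != (0,0):
--         parent = memo[parent[0]][parent[1]]
--         path.append(parent)
--     path.reverse()
--
--     return path
-- ===== SOURCE B (Python) =====
-- # Same in-place DP fill (grid is mutated like in A), but no parent memo table:
-- # the path is reconstructed backward from the filled grid itself.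
-- def maxProfitPath(grid) -> int:
--
--     rows = len(grid)
--     cols = len(grid[0])
--
--     for i in range(rows):
--         for j in range(cols):
--             if i > 0 and j > 0:
--                 best = grid[i][j-1] if grid[i][j-1] > grid[i-1][j] else grid[i-1][j]
--             elif i > 0:
--                 best = grid[i-1][j]
--             elif j > 0:
--                 best = grid[i][j-1]
--             else:
--                 best = 0
--             grid[i][j] += best
--
--     # Walk backward from the last cell, re-deriving each parent from the
--     # cumulative values, collecting the path back-to-front.
--     i, j = rows - 1, cols - 1
--     path = []
--     while True:
--         path.append((i, j))
--         if i > 0 and j > 0: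
--             if grid[i][j-1] > grid[i-1][j]:
--                 j -= 1
--             else:
--                 i -= 1
--         elif i > 0:
--             i -= 1
--         elif j > 0:
--             j -= 1
--         else:
--             break
--     path.reverse()
--     return path
-- ===== Notes on version B (the rewrite author's own statement) =====
-- stated objective: simpler
-- what changed: B drops A's parent memo table entirely: after the same in-place DP fill it reconstructs the path by walking backward from the bottom-right cell, re-deriving each parent from the cumulative grid values, instead of recording and replaying parents.
import Mathlib
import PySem

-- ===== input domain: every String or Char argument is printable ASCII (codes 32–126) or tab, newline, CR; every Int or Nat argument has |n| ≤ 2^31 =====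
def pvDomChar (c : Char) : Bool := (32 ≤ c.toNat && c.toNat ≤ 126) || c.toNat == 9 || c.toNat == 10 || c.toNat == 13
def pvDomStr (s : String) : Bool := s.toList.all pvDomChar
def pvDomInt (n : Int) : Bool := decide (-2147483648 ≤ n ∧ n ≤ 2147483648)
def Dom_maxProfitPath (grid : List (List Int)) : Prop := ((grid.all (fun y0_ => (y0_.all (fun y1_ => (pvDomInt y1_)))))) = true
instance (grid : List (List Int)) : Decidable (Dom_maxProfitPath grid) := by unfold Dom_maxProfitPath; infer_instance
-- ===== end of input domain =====

-- B drops A's parent memo table and reconstructs the path backward from the filled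
-- grid (same in-place DP fill; both programs mutate the Python argument identically,
-- the equivalence proved here is about the return value).


-- ===== PORT A =====

-- grid[i][j] / grid[i][j] = v with Nat loop indices: exact for Python's nonneg
-- in-range indexing, which Pre_ guarantees during the fill.
def gGet (g : List (List Int)) (i j : Nat) : Int := (g.getD i []).getD j 0
def gSet (g : List (List Int)) (i j : Nat) (v : Int) : List (List Int) :=
  g.set i ((g.getD i []).set j v)
def mSet (m : List (List (Int × Int))) (i j : Nat) (v : Int × Int) : List (List (Int × Int)) :=
  m.set i ((m.getD i []).set j v)

-- body of A's inner loop: compute (parent, profit) for cell (i,j), write both tables.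
-- (Python initialises memo rows with ints 0; the placeholder here is the pair (0,0),
-- every entry is overwritten before it is read.)
def cellA (st : List (List Int) × List (List (Int × Int))) (i j : Nat) :
    List (List Int) × List (List (Int × Int)) :=
  let g := st.1
  let pp : (Int × Int) × Int :=
    if 0 < i ∧ 0 < j then
      if gGet g i (j - 1) > gGet g (i - 1) j then
        ((↑i, ↑(j - 1)), gGet g i j + gGet g i (j - 1))
      else
        ((↑(i - 1), ↑j), gGet g i j + gGet g (i - 1) j)
    else if 0 < i then ((↑(i - 1), ↑j), gGet g i j + gGet g (i - 1) j)
    else if 0 < j then ((↑i, ↑(j - 1)), gGet g i j + gGet g i (j - 1))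
    else ((↑i, ↑j), gGet g i j)
  (gSet g i j pp.2, mSet st.2 i j pp.1)

-- A's while loop; the fuel (rows+cols at the call site) strictly dominates the number
-- of iterations under Pre_ (each memo parent decreases i+j by one; proved below).
def walkA (memo : List (List (Int × Int))) : Nat → Int × Int → List (Int × Int) → List (Int × Int)
  | 0, _, path => path
  | fuel + 1, parent, path =>
    if parent = ((0 : Int), (0 : Int)) then path
    else
      let parent' := (PySem.List.pyGetD memo parent.1 []).getD parent.2.toNat (0, 0)
      walkA memo fuel parent' (path.concat parent')

def maxProfitPath (grid : List (List Int)) : List (Int × Int) :=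
  let rows := grid.length
  let cols := (grid.getD 0 []).length
  let memo0 := (List.range rows).foldl
    (fun m _ => m.concat (List.replicate cols ((0 : Int), (0 : Int)))) []
  let st := (List.range rows).foldl
    (fun st i => (List.range cols).foldl (fun st j => cellA st i j) st) (grid, memo0)
  let parent : Int × Int := ((rows : Int) - 1, (cols : Int) - 1)
  let path := walkA st.2 (rows + cols) parent [parent]
  path.reverse

-- ===== PORT B =====

def bestNbr (g : List (List Int)) (i j : Nat) : Int :=
  if 0 < i ∧ 0 < j then
    if gGet g i (j - 1) > gGet g (i - 1) j then gGet g i (j - 1) else gGet g (i - 1) j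
  else if 0 < i then gGet g (i - 1) j
  else if 0 < j then gGet g i (j - 1)
  else 0

def cellB (g : List (List Int)) (i j : Nat) : List (List Int) :=
  gSet g i j (gGet g i j + bestNbr g i j)

-- B's backward walk (Python's while True loop; i,j stay ≥ 0 there, so Nat is exact).
def walkB (g : List (List Int)) (i j : Nat) (path : List (Int × Int)) : List (Int × Int) :=
  let path' := path.concat ((i : Int), (j : Int))
  if h : 0 < i ∧ 0 < j then
    if gGet g i (j - 1) > gGet g (i - 1) j then walkB g i (j - 1) path'
    else walkB g (i - 1) j path'
  else if h2 : 0 < i then walkB g (i - 1) j path'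
  else if h3 : 0 < j then walkB g i (j - 1) path'
  else path'
termination_by i + j
decreasing_by all_goals omega

def maxProfitPath_alt (grid : List (List Int)) : List (Int × Int) :=
  let rows := grid.length
  let cols := (grid.getD 0 []).length
  let g := (List.range rows).foldl
    (fun g i => (List.range cols).foldl (fun g j => cellB g i j) g) grid
  (walkB g (rows - 1) (cols - 1) []).reverse

-- ===== PRECONDITION & SPEC =====

-- Pre_ excludes exactly the inputs on which A raises: the empty grid and a grid with
-- an empty first row (IndexError in len(grid[0]) resp. in the path walk), and ragged
-- grids with some row shorter than the first (IndexError in the fill).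
def Pre_maxProfitPath (grid : List (List Int)) : Prop :=
  grid ≠ [] ∧ 0 < (grid.getD 0 []).length ∧
    ∀ row ∈ grid, (grid.getD 0 []).length ≤ row.length
instance (grid : List (List Int)) : Decidable (Pre_maxProfitPath grid) := by
  unfold Pre_maxProfitPath; infer_instance

def pvWitness_maxProfitPath : List (List Int) := [[1, 2], [3, 4]]

def Spec_maxProfitPath (grid : List (List Int)) (out : List (Int × Int)) : Prop :=
  out = maxProfitPath_alt grid
instance (grid : List (List Int)) (out : List (Int × Int)) : Decidable (Spec_maxProfitPath grid out) := by
  unfold Spec_maxProfitPath; infer_instance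

-- ===== CLAIM (what is proved, stated in full; the proofs are below) =====
def Claim_equal_maxProfitPath : Prop :=
  ∀ (grid : List (List Int)), Dom_maxProfitPath grid → Pre_maxProfitPath grid →
    Spec_maxProfitPath grid (maxProfitPath grid)

-- ===== LEMMAS AND PROOFS =====

-- proof-side reader for the memo table
def mGet (m : List (List (Int × Int))) (i j : Nat) : Int × Int := (m.getD i []).getD j (0, 0)

-- the DP value of cell (i,j) over the ORIGINAL grid
def dp (g0 : List (List Int)) (i j : Nat) : Int :=
  gGet g0 i j +
    (if h : 0 < i ∧ 0 < j then
      (if dp g0 i (j - 1) > dp g0 (i - 1) j then dp g0 i (j - 1) else dp g0 (i - 1) j)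
    else if 0 < i then dp g0 (i - 1) j
    else if 0 < j then dp g0 i (j - 1)
    else 0)
termination_by i + j
decreasing_by all_goals omega

-- the parent A's memo records for cell (i,j)
def pspec (g0 : List (List Int)) (i j : Nat) : Int × Int :=
  if 0 < i ∧ 0 < j then
    (if dp g0 i (j - 1) > dp g0 (i - 1) j then ((i : Int), ((j - 1 : Nat) : Int))
     else (((i - 1 : Nat) : Int), (j : Int)))
  else if 0 < i then (((i - 1 : Nat) : Int), (j : Int))
  else if 0 < j then ((i : Int), ((j - 1 : Nat) : Int))
  else ((i : Int), (j : Int))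


-- ---- small getD/set facts ----

theorem getD_set_eq {α : Type} (l : List α) (i : Nat) (v d : α) (h : i < l.length) :
    (l.set i v).getD i d = v := by
  rw [List.getD_eq_getElem?_getD, List.getElem?_set_self]
  · rfl
  · exact h

theorem getD_set_ne {α : Type} (l : List α) (i j : Nat) (v d : α) (h : i ≠ j) :
    (l.set i v).getD j d = l.getD j d := by
  rw [List.getD_eq_getElem?_getD, List.getElem?_set_ne h, ← List.getD_eq_getElem?_getD]

theorem gGet_gSet (g : List (List Int)) (i j a b : Nat) (v : Int)
    (hi : i < g.length) (hj : j < (g.getD i []).length) :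
    gGet (gSet g i j v) a b = if a = i ∧ b = j then v else gGet g a b := by
  unfold gGet gSet
  by_cases ha : a = i
  · subst ha
    rw [getD_set_eq _ _ _ _ hi]
    by_cases hb : b = j
    · subst hb; rw [getD_set_eq _ _ _ _ hj]; simp
    · rw [getD_set_ne _ _ _ _ _ (fun h => hb h.symm)]; simp [hb]
  · rw [getD_set_ne _ _ _ _ _ (fun h => ha h.symm)]; simp [ha]

theorem mGet_mSet (m : List (List (Int × Int))) (i j a b : Nat) (v : Int × Int)
    (hi : i < m.length) (hj : j < (m.getD i []).length) :
    mGet (mSet m i j v) a b = if a = i ∧ b = j then v else mGet m a b := by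
  unfold mGet mSet
  by_cases ha : a = i
  · subst ha
    rw [getD_set_eq _ _ _ _ hi]
    by_cases hb : b = j
    · subst hb; rw [getD_set_eq _ _ _ _ hj]; simp
    · rw [getD_set_ne _ _ _ _ _ (fun h => hb h.symm)]; simp [hb]
  · rw [getD_set_ne _ _ _ _ _ (fun h => ha h.symm)]; simp [ha]

theorem gSet_length (g : List (List Int)) (i j : Nat) (v : Int) :
    (gSet g i j v).length = g.length := List.length_set

theorem gSet_row_length (g : List (List Int)) (i j a : Nat) (v : Int) :
    ((gSet g i j v).getD a []).length = (g.getD a []).length := by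
  unfold gSet
  by_cases ha : a = i
  · subst ha
    by_cases hi : a < g.length
    · rw [getD_set_eq _ _ _ _ hi]; simp
    · rw [List.set_eq_of_length_le (by omega)]
  · rw [getD_set_ne _ _ _ _ _ (fun h => ha h.symm)]

theorem mSet_length (m : List (List (Int × Int))) (i j : Nat) (v : Int × Int) :
    (mSet m i j v).length = m.length := List.length_set

theorem mSet_row_length (m : List (List (Int × Int))) (i j a : Nat) (v : Int × Int) :
    ((mSet m i j v).getD a []).length = (m.getD a []).length := by
  unfold mSet
  by_cases ha : a = i
  · subst ha
    by_cases hi : a < m.length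
    · rw [getD_set_eq _ _ _ _ hi]; simp
    · rw [List.set_eq_of_length_le (by omega)]
  · rw [getD_set_ne _ _ _ _ _ (fun h => ha h.symm)]

-- ---- the fill invariant ----

-- cells already written when the fill is about to process cell (i,j), row-major
def Processed (i j a b : Nat) : Prop := a < i ∨ (a = i ∧ b < j)

def FillInv (g0 : List (List Int)) (i j : Nat)
    (st : List (List Int) × List (List (Int × Int))) : Prop :=
  st.1.length = g0.length ∧
  (∀ a, (st.1.getD a []).length = (g0.getD a []).length) ∧
  st.2.length = g0.length ∧
  (∀ a, a < g0.length → (st.2.getD a []).length = (g0.getD 0 []).length) ∧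
  (∀ a b, a < g0.length → b < (g0.getD 0 []).length →
    (Processed i j a b → gGet st.1 a b = dp g0 a b ∧ mGet st.2 a b = pspec g0 a b) ∧
    (¬ Processed i j a b → gGet st.1 a b = gGet g0 a b))

theorem dp_eq (g0 : List (List Int)) (i j : Nat) :
    dp g0 i j = gGet g0 i j +
      (if 0 < i ∧ 0 < j then
        (if dp g0 i (j - 1) > dp g0 (i - 1) j then dp g0 i (j - 1) else dp g0 (i - 1) j)
      else if 0 < i then dp g0 (i - 1) j
      else if 0 < j then dp g0 i (j - 1)
      else 0) := by
  rw [dp]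
  simp only [dite_eq_ite]

theorem cellA_inv (g0 : List (List Int)) (i j : Nat)
    (HR : ∀ a, a < g0.length → (g0.getD 0 []).length ≤ (g0.getD a []).length)
    (hi : i < g0.length) (hj : j < (g0.getD 0 []).length)
    (st : List (List Int) × List (List (Int × Int))) (h : FillInv g0 i j st) :
    FillInv g0 i (j + 1) (cellA st i j) := by
  obtain ⟨h1, h2, h3, h4, h5⟩ := h
  have hgrow : j < (st.1.getD i []).length := by
    rw [h2]; exact lt_of_lt_of_le hj (HR i hi)
  have hglen : i < st.1.length := by omega
  have hmlen : i < st.2.length := by omega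
  have hmrow : j < (st.2.getD i []).length := by rw [h4 i hi]; exact hj
  -- values read by the cell body
  have hcur : gGet st.1 i j = gGet g0 i j := by
    exact (h5 i j hi hj).2 (by unfold Processed; omega)
  have hleft : 0 < j → gGet st.1 i (j - 1) = dp g0 i (j - 1) := by
    intro hj0
    exact ((h5 i (j - 1) hi (by omega)).1 (by unfold Processed; omega)).1
  have hup : 0 < i → gGet st.1 (i - 1) j = dp g0 (i - 1) j := by
    intro hi0
    exact ((h5 (i - 1) j (by omega) hj).1 (by unfold Processed; omega)).1
  -- what the cell writes
  have hwrite : cellA st i j = (gSet st.1 i j (dp g0 i j), mSet st.2 i j (pspec g0 i j)) := by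
    simp only [cellA]
    rw [dp_eq g0 i j]
    unfold pspec
    by_cases hb : 0 < i ∧ 0 < j
    · rw [hleft hb.2, hup hb.1, hcur]
      by_cases hcmp : dp g0 i (j - 1) > dp g0 (i - 1) j
      · simp [hb, hcmp]
      · simp [hb, hcmp]
    · by_cases hi0 : 0 < i
      · have hj0 : ¬ 0 < j := fun hh => hb ⟨hi0, hh⟩
        rw [hup hi0, hcur]; simp [hi0, hj0]
      · by_cases hj0 : 0 < j
        · rw [hleft hj0, hcur]; simp [hb, hi0, hj0]
        · simp [hi0, hj0, hcur]
  rw [hwrite]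
  refine ⟨by simpa [gSet_length] using h1, ?_, by simpa [mSet_length] using h3, ?_, ?_⟩
  · intro a; rw [gSet_row_length]; exact h2 a
  · intro a ha; rw [mSet_row_length]; exact h4 a ha
  · intro a b ha hb
    constructor
    · intro hp
      rw [gGet_gSet _ _ _ _ _ _ hglen hgrow, mGet_mSet _ _ _ _ _ _ hmlen hmrow]
      by_cases hab : a = i ∧ b = j
      · simp [hab]
      · have hp' : Processed i j a b := by unfold Processed at hp ⊢; omega
        simp only [hab, if_false]
        exact (h5 a b ha hb).1 hp'
    · intro hp
      have hab : ¬(a = i ∧ b = j) := by unfold Processed at hp; omega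
      rw [gGet_gSet _ _ _ _ _ _ hglen hgrow]
      simp only [hab, if_false]
      exact (h5 a b ha hb).2 (by unfold Processed at hp ⊢; omega)

theorem rowA_inv (g0 : List (List Int))
    (HR : ∀ a, a < g0.length → (g0.getD 0 []).length ≤ (g0.getD a []).length)
    (i : Nat) (hi : i < g0.length) :
    ∀ (k j : Nat), j + k ≤ (g0.getD 0 []).length →
      ∀ st, FillInv g0 i j st →
        FillInv g0 i (j + k) ((List.range' j k).foldl (fun st j => cellA st i j) st) := by
  intro k
  induction k with
  | zero => intro j _ st h; simpa using h
  | succ n ih =>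
      intro j hjk st h
      rw [List.range'_succ, List.foldl_cons]
      have := ih (j + 1) (by omega) (cellA st i j) (cellA_inv g0 i j HR hi (by omega) st h)
      have harith : j + 1 + n = j + (n + 1) := by omega
      rwa [harith] at this

theorem FillInv_row_end (g0 : List (List Int)) (i : Nat) (st : List (List Int) × List (List (Int × Int)))
    (h : FillInv g0 i (g0.getD 0 []).length st) : FillInv g0 (i + 1) 0 st := by
  obtain ⟨h1, h2, h3, h4, h5⟩ := h
  refine ⟨h1, h2, h3, h4, ?_⟩
  intro a b ha hb
  have hpp : Processed i (g0.getD 0 []).length a b ↔ Processed (i + 1) 0 a b := by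
    unfold Processed; omega
  constructor
  · intro hp; exact (h5 a b ha hb).1 (hpp.mpr hp)
  · intro hp; exact (h5 a b ha hb).2 (fun c => hp (hpp.mp c))

theorem fillA_inv (g0 : List (List Int))
    (HR : ∀ a, a < g0.length → (g0.getD 0 []).length ≤ (g0.getD a []).length) :
    ∀ (k i : Nat), i + k ≤ g0.length →
      ∀ st, FillInv g0 i 0 st →
        FillInv g0 (i + k) 0 ((List.range' i k).foldl
          (fun st i => (List.range (g0.getD 0 []).length).foldl (fun st j => cellA st i j) st) st) := by
  intro k
  induction k with
  | zero => intro i _ st h; simpa using h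
  | succ n ih =>
      intro i hik st h
      rw [List.range'_succ, List.foldl_cons]
      have hrow := rowA_inv g0 HR i (by omega) (g0.getD 0 []).length 0 (by omega) st h
      rw [Nat.zero_add, ← List.range_eq_range'] at hrow
      have := ih (i + 1) (by omega) _ (FillInv_row_end g0 i _ hrow)
      have harith : i + 1 + n = i + (n + 1) := by omega
      rwa [harith] at this

theorem memo0_eq (n : Nat) (r : List (Int × Int)) :
    (List.range n).foldl (fun m _ => m.concat r) [] = List.replicate n r := by
  suffices h : ∀ acc : List (List (Int × Int)),
      (List.range n).foldl (fun m _ => m.concat r) acc = acc ++ List.replicate n r by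
    simpa using h []
  induction n with
  | zero => simp
  | succ k ih => intro acc; rw [List.range_succ, List.foldl_append]; simp [List.replicate_succ']

theorem FillInv_init (g0 : List (List Int)) :
    FillInv g0 0 0 (g0, List.replicate g0.length (List.replicate (g0.getD 0 []).length ((0 : Int), (0 : Int)))) := by
  refine ⟨rfl, fun a => rfl, by simp, ?_, ?_⟩
  · intro a ha
    have : (List.replicate g0.length (List.replicate (g0.getD 0 []).length ((0:Int),(0:Int)))).getD a []
        = List.replicate (g0.getD 0 []).length ((0:Int),(0:Int)) := by
      rw [List.getD_eq_getElem?_getD, List.getElem?_replicate]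
      simp [ha]
    rw [this]; simp
  · intro a b _ _
    constructor
    · intro hp; unfold Processed at hp; omega
    · intro _; rfl

-- ---- B's fill computes exactly the grid component of A's fill ----

theorem cellA_fst (st : List (List Int) × List (List (Int × Int))) (i j : Nat) :
    (cellA st i j).1 = cellB st.1 i j := by
  unfold cellA cellB bestNbr
  by_cases hb : 0 < i ∧ 0 < j
  · by_cases hcmp : gGet st.1 i (j - 1) > gGet st.1 (i - 1) j
    · simp [hb, hcmp]
    · simp [hb, hcmp]
  · by_cases hi0 : 0 < i
    · have hj0 : ¬ 0 < j := fun hh => hb ⟨hi0, hh⟩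
      simp [hi0, hj0]
    · by_cases hj0 : 0 < j <;> simp [hb, hi0, hj0]

theorem rowAB_fst (i : Nat) :
    ∀ (l : List Nat) (st : List (List Int) × List (List (Int × Int))),
      (l.foldl (fun st j => cellA st i j) st).1 = l.foldl (fun g j => cellB g i j) st.1 := by
  intro l
  induction l with
  | nil => intro st; rfl
  | cons x xs ih => intro st; rw [List.foldl_cons, List.foldl_cons, ih, cellA_fst]

theorem fillAB_fst (cols : Nat) :
    ∀ (l : List Nat) (st : List (List Int) × List (List (Int × Int))),
      (l.foldl (fun st i => (List.range cols).foldl (fun st j => cellA st i j) st) st).1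
        = l.foldl (fun g i => (List.range cols).foldl (fun g j => cellB g i j) g) st.1 := by
  intro l
  induction l with
  | nil => intro st; rfl
  | cons x xs ih => intro st; rw [List.foldl_cons, List.foldl_cons, ih, rowAB_fst]

-- ---- the two walks agree ----

theorem walk_eq (g0 G : List (List Int)) (M : List (List (Int × Int)))
    (HG : ∀ a b, a < g0.length → b < (g0.getD 0 []).length → gGet G a b = dp g0 a b)
    (HM : ∀ a b, a < g0.length → b < (g0.getD 0 []).length → mGet M a b = pspec g0 a b) :
    ∀ (fuel i j : Nat) (acc : List (Int × Int)),
      i < g0.length → j < (g0.getD 0 []).length → i + j < fuel →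
      walkA M fuel ((i : Int), (j : Int)) (acc.concat ((i : Int), (j : Int))) = walkB G i j acc := by
  intro fuel
  induction fuel with
  | zero => intro i j acc _ _ h; omega
  | succ f ih =>
      intro i j acc hi hj hf
      rw [walkA, walkB]
      by_cases h00 : i = 0 ∧ j = 0
      · obtain ⟨rfl, rfl⟩ := h00
        simp
      · have hne : ((i : Int), (j : Int)) ≠ ((0 : Int), (0 : Int)) := by
          simp only [ne_eq, Prod.mk.injEq]
          omega
        rw [if_neg hne]
        have hlookup : (PySem.List.pyGetD M ((i : Int), (j : Int)).1 []).getD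
            ((i : Int), (j : Int)).2.toNat (0, 0) = pspec g0 i j := by
          simp only [PySem.List.pyGetD_natCast, Int.toNat_natCast]
          exact HM i j hi hj
        rw [hlookup]
        unfold pspec
        by_cases hb : 0 < i ∧ 0 < j
        · rw [if_pos hb, dif_pos hb]
          rw [HG i (j - 1) hi (by omega), HG (i - 1) j (by omega) hj]
          by_cases hcmp : dp g0 i (j - 1) > dp g0 (i - 1) j
          · rw [if_pos hcmp, if_pos hcmp]
            exact ih i (j - 1) (acc.concat ((i : Int), (j : Int))) hi (by omega) (by omega)
          · rw [if_neg hcmp, if_neg hcmp]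
            exact ih (i - 1) j (acc.concat ((i : Int), (j : Int))) (by omega) hj (by omega)
        · rw [if_neg hb, dif_neg hb]
          by_cases hi0 : 0 < i
          · rw [if_pos hi0, dif_pos hi0]
            exact ih (i - 1) j (acc.concat ((i : Int), (j : Int))) (by omega) hj (by omega)
          · have hj0 : 0 < j := by omega
            rw [if_neg hi0, if_pos hj0, dif_neg hi0, dif_pos hj0]
            exact ih i (j - 1) (acc.concat ((i : Int), (j : Int))) hi (by omega) (by omega)

-- ===== VERDICT (by name: the statement is the Claim_ definition above) =====
theorem maxProfitPath_spec : Claim_equal_maxProfitPath := by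
  intro grid _ hpre
  obtain ⟨hne, hc, hrows⟩ := hpre
  unfold Spec_maxProfitPath
  simp only [maxProfitPath, maxProfitPath_alt]
  have hr : 0 < grid.length := List.length_pos_iff.mpr hne
  have HR : ∀ a, a < grid.length → (grid.getD 0 []).length ≤ (grid.getD a []).length := by
    intro a ha
    refine hrows _ ?_
    rw [List.getD_eq_getElem?_getD, List.getElem?_eq_getElem ha]
    exact List.getElem_mem ha
  -- the filled state and its invariant
  rw [memo0_eq]
  have hinv := fillA_inv grid HR grid.length 0 (by omega)
      (grid, List.replicate grid.length (List.replicate (grid.getD 0 []).length ((0:Int),(0:Int))))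
      (FillInv_init grid)
  rw [← List.range_eq_range'] at hinv
  simp only [Nat.zero_add] at hinv
  set st := (List.range grid.length).foldl
    (fun st i => (List.range (grid.getD 0 []).length).foldl (fun st j => cellA st i j) st)
    (grid, List.replicate grid.length (List.replicate (grid.getD 0 []).length ((0:Int),(0:Int)))) with hst
  obtain ⟨_, _, _, _, h5⟩ := hinv
  have HG : ∀ a b, a < grid.length → b < (grid.getD 0 []).length → gGet st.1 a b = dp grid a b := by
    intro a b ha hb
    exact ((h5 a b ha hb).1 (Or.inl ha)).1
  have HM : ∀ a b, a < grid.length → b < (grid.getD 0 []).length → mGet st.2 a b = pspec grid a b := by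
    intro a b ha hb
    exact ((h5 a b ha hb).1 (Or.inl ha)).2
  -- B's grid is A's grid component
  have hBfill : (List.range grid.length).foldl
      (fun g i => (List.range (grid.getD 0 []).length).foldl (fun g j => cellB g i j) g) grid = st.1 := by
    rw [hst, fillAB_fst]
  rw [hBfill]
  -- the starting cell, as Nat casts
  have hcast1 : ((grid.length : Int) - 1) = ((grid.length - 1 : Nat) : Int) := by omega
  have hcast2 : (((grid.getD 0 []).length : Int) - 1) = (((grid.getD 0 []).length - 1 : Nat) : Int) := by omega
  rw [hcast1, hcast2]
  have hwalk := walk_eq grid st.1 st.2 HG HM (grid.length + (grid.getD 0 []).length)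
      (grid.length - 1) ((grid.getD 0 []).length - 1) [] (by omega) (by omega) (by omega)
  simp only [List.concat] at hwalk ⊢
  rw [hwalk]
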